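-- pv_equiv track=rewrite | github.com/BigAngryDinosaur/amazonoa | separate_pages/solution.py | numberOfWays_optimized
-- ===== SOURCE A (Python) =====
-- def numberOfWays_optimized(book):
--     """
--     Even more space-optimized version using only necessary variables.
--
--     Time Complexity: O(n)
--     Space Complexity: O(1)
--     """
--     n = len(book)
--     if n < 3:
--         return 0
--
--     # Track states: [count_with_1_page_ending_0, count_with_1_page_ending_1,
--     #                count_with_2_pages_ending_0, count_with_2_pages_ending_1]
--     one_page_0, one_page_1 = 0, 0
--     two_pages_0, two_pages_1 = 0, 0
--     three_pages = 0
--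
--     for i in range(n):
--         page_type = int(book[i])
--
--         if page_type == 0:
--             # Can form 3-page sequence if we had 2 pages ending with 1
--             three_pages += two_pages_1
--             # Can form 2-page sequence if we had 1 page ending with 1
--             new_two_pages_0 = two_pages_0 + one_page_1
--             # Always can start new 1-page sequence
--             new_one_page_0 = one_page_0 + 1
--
--             two_pages_0 = new_two_pages_0
--             one_page_0 = new_one_page_0
--         else:  # page_type == 1
--             # Can form 3-page sequence if we had 2 pages ending with 0
--             three_pages += two_pages_0
--             # Can form 2-page sequence if we had 1 page ending with 0
--             new_two_pages_1 = two_pages_1 + one_page_0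
--             # Always can start new 1-page sequence
--             new_one_page_1 = one_page_1 + 1
--
--             two_pages_1 = new_two_pages_1
--             one_page_1 = new_one_page_1
--
--     return three_pages
-- ===== SOURCE B (Python) =====
-- def numberOfWays_optimized(book):
--     """Fix-the-middle counting: each alternating triple is counted at its
--     middle element as (#opposite before) * (#opposite after)."""
--     total0 = sum(1 for x in book if int(x) == 0)
--     total1 = len(book) - total0
--     zeros_before = ones_before = 0
--     res = 0
--     for x in book:
--         if int(x) == 0:
--             res += ones_before * (total1 - ones_before)
--             zeros_before += 1
--         else:
--             res += zeros_before * (total0 - zeros_before)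
--             ones_before += 1
--     return res
-- ===== Notes on version B (the rewrite author's own statement) =====
-- stated objective: alternative
-- what changed: Replaces the 5-variable incremental DP over sequence states with a fix-the-middle count: totals of zeros/ones are computed first, then one sweep adds (opposite-before)*(opposite-after) at each element.
import Mathlib
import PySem

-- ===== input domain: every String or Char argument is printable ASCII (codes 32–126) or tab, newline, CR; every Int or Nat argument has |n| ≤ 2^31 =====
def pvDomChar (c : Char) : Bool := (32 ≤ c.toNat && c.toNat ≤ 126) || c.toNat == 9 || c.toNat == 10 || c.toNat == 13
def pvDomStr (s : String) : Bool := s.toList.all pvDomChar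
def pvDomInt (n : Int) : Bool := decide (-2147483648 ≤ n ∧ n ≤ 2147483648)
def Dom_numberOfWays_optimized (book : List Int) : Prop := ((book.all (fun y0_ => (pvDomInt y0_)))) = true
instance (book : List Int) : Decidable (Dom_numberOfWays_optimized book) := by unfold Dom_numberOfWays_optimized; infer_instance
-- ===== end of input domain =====

-- B replaces A's incremental 5-state DP with a fix-the-middle count (totals first, then
-- before*after products per element); same cost, different decomposition (objective: alternative).

-- ===== PORT A =====
-- loop body of A: state (one_page_0, one_page_1, two_pages_0, two_pages_1, three_pages)
def pvStepA (st : Int × Int × Int × Int × Int) (x : Int) : Int × Int × Int × Int × Int :=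
  let (p0, p1, t0, t1, c) := st
  if x == 0 then (p0 + 1, p1, t0 + p1, t1, c + t1)
  else (p0, p1 + 1, t0, t1 + p0, c + t0)

def numberOfWays_optimized (book : List Int) : Int :=
  let n : Int := book.length
  if n < 3 then 0
  else ((book.foldl pvStepA (0, 0, 0, 0, 0)).2.2.2.2)

-- ===== PORT B =====
-- loop body of B (totals fixed): state (zeros_before, ones_before, res)
def pvStepB (total0 total1 : Int) (st : Int × Int × Int) (x : Int) : Int × Int × Int :=
  let (z, o, r) := st
  if x == 0 then (z + 1, o, r + o * (total1 - o))
  else (z, o + 1, r + z * (total0 - z))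

def numberOfWays_optimized_alt (book : List Int) : Int :=
  let total0 : Int := ((book.filter (fun x => x == 0)).length : Int)
  let total1 : Int := (book.length : Int) - total0
  (book.foldl (pvStepB total0 total1) (0, 0, 0)).2.2

-- ===== PRECONDITION & SPEC =====
def Spec_numberOfWays_optimized (book : List Int) (out : Int) : Prop := out = numberOfWays_optimized_alt book
instance (book : List Int) (out : Int) : Decidable (Spec_numberOfWays_optimized book out) := by unfold Spec_numberOfWays_optimized; infer_instance

-- ===== CLAIM (what is proved, stated in full; the proofs are below) =====
def Claim_equal_numberOfWays_optimized : Prop := ∀ (book : List Int), Dom_numberOfWays_optimized book → Spec_numberOfWays_optimized book (numberOfWays_optimized book)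

-- ===== LEMMAS AND PROOFS =====

-- statistics of a list: #zeros, #ones(nonzeros), pairs 1·0, pairs 0·1, triples 0·1·0, triples 1·0·1
def pvCZ : List Int → Int
  | [] => 0
  | x :: t => (if x == 0 then 1 else 0) + pvCZ t
def pvCO : List Int → Int
  | [] => 0
  | x :: t => (if x == 0 then 0 else 1) + pvCO t
def pvP10 : List Int → Int
  | [] => 0
  | x :: t => (if x == 0 then 0 else pvCZ t) + pvP10 t
def pvP01 : List Int → Int
  | [] => 0
  | x :: t => (if x == 0 then pvCO t else 0) + pvP01 t
def pvT010 : List Int → Int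
  | [] => 0
  | x :: t => (if x == 0 then pvP10 t else 0) + pvT010 t
def pvT101 : List Int → Int
  | [] => 0
  | x :: t => (if x == 0 then 0 else pvP01 t) + pvT101 t

theorem pvFoldA (l : List Int) : ∀ p0 p1 t0 t1 c : Int,
    l.foldl pvStepA (p0, p1, t0, t1, c) =
      (p0 + pvCZ l, p1 + pvCO l, t0 + p1 * pvCZ l + pvP10 l, t1 + p0 * pvCO l + pvP01 l,
        c + t1 * pvCZ l + t0 * pvCO l + p0 * pvP10 l + p1 * pvP01 l + pvT010 l + pvT101 l) := by
  induction l with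
  | nil => intro p0 p1 t0 t1 c; simp [pvCZ, pvCO, pvP10, pvP01, pvT010, pvT101]
  | cons x t ih =>
    intro p0 p1 t0 t1 c
    by_cases hx : x = 0
    · simp only [List.foldl_cons, pvStepA, hx, beq_self_eq_true, ite_true, ih,
        pvCZ, pvCO, pvP10, pvP01, pvT010, pvT101, Prod.mk.injEq]
      refine ⟨by ring, by ring, by ring, by ring, by ring⟩
    · have hb : (x == 0) = false := by simp [hx]
      simp only [List.foldl_cons, pvStepA, hb, Bool.false_eq_true, ite_false, ih,
        pvCZ, pvCO, pvP10, pvP01, pvT010, pvT101, Prod.mk.injEq]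
      refine ⟨by ring, by ring, by ring, by ring, by ring⟩

theorem pvFoldB (l : List Int) : ∀ z o r T0 T1 : Int, T0 = z + pvCZ l → T1 = o + pvCO l →
    (l.foldl (pvStepB T0 T1) (z, o, r)).2.2 =
      r + o * pvP01 l + z * pvP10 l + pvT010 l + pvT101 l := by
  induction l with
  | nil => intro z o r T0 T1 h0 h1; simp [pvP01, pvP10, pvT010, pvT101]
  | cons x t ih =>
    intro z o r T0 T1 h0 h1
    by_cases hx : x = 0
    · have h0' : T0 = (z + 1) + pvCZ t := by simp [h0, pvCZ, hx]; ring
      have h1' : T1 = o + pvCO t := by simp [h1, pvCO, hx]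
      simp only [List.foldl_cons, pvStepB, hx, beq_self_eq_true, ite_true]
      rw [ih (z + 1) o _ T0 T1 h0' h1']
      simp only [pvP01, pvP10, pvT010, pvT101, hx, beq_self_eq_true, ite_true, h1']
      ring
    · have hb : (x == 0) = false := by simp [hx]
      have h0' : T0 = z + pvCZ t := by simp [h0, pvCZ, hb]
      have h1' : T1 = (o + 1) + pvCO t := by simp [h1, pvCO, hb]; ring
      simp only [List.foldl_cons, pvStepB, hb, Bool.false_eq_true, ite_false]
      rw [ih z (o + 1) _ T0 T1 h0' h1']
      simp only [pvP01, pvP10, pvT010, pvT101, hb, Bool.false_eq_true, ite_false, h0']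
      ring

theorem pvFilterCZ (l : List Int) : ((l.filter (fun x => x == 0)).length : Int) = pvCZ l := by
  induction l with
  | nil => simp [pvCZ]
  | cons x t ih =>
    by_cases hx : x = 0 <;> simp [List.filter_cons, pvCZ, hx, ← ih] <;> push_cast <;> ring

theorem pvCZ_CO (l : List Int) : pvCZ l + pvCO l = (l.length : Int) := by
  induction l with
  | nil => simp [pvCZ, pvCO]
  | cons x t ih =>
    by_cases hx : x = 0 <;> simp [pvCZ, pvCO, hx] <;> push_cast <;> omega

theorem pvAlt_closed (l : List Int) :
    numberOfWays_optimized_alt l = pvT010 l + pvT101 l := by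
  unfold numberOfWays_optimized_alt
  have h0 : ((l.filter (fun x => x == 0)).length : Int) = 0 + pvCZ l := by
    simp [pvFilterCZ]
  have h1 : (l.length : Int) - ((l.filter (fun x => x == 0)).length : Int) = 0 + pvCO l := by
    rw [pvFilterCZ]; have := pvCZ_CO l; omega
  simp only []
  rw [pvFoldB l 0 0 0 _ _ h0 h1]
  ring

theorem pvShortTrip (l : List Int) (h : l.length < 3) : pvT010 l + pvT101 l = 0 := by
  match l, h with
  | [], _ => simp [pvT010, pvT101]
  | [a], _ =>
    by_cases ha : a = 0 <;> simp [pvT010, pvT101, pvP10, pvP01, ha]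
  | [a, b], _ =>
    by_cases ha : a = 0 <;> by_cases hb : b = 0 <;>
      simp [pvT010, pvT101, pvP10, pvP01, pvCZ, pvCO, ha, hb]

-- ===== VERDICT (by name: the statement is the Claim_ definition above) =====
theorem numberOfWays_optimized_spec : Claim_equal_numberOfWays_optimized := by
  intro book _
  unfold Spec_numberOfWays_optimized
  rw [pvAlt_closed]
  unfold numberOfWays_optimized
  by_cases h : (book.length : Int) < 3
  · have : book.length < 3 := by exact_mod_cast h
    simp [h, pvShortTrip book this]
  · simp only [h, if_false, ite_false]
    rw [pvFoldA book 0 0 0 0 0]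
    ring
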